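-- pv_equiv track=rewrite | github.com/Astrmeteor/CHE | MultiConvTest.py | start_index
-- ===== SOURCE A (Python) =====
-- def start_index(m, n, s):
--     idx = []
--     rot_idx = []
--     for i in range(n):
--         for j in range(n):
--             idx.append(i*s*m + j*s)
--     for j in range(1, n*n):
--         rot_idx.append(idx[j] - j)
--     # idx raw valid index; rot_idx rotation index
--     return idx, rot_idx
-- ===== SOURCE B (Python) =====
-- def start_index(m, n, s):
--     # Incremental stepping (difference/prefix-sum scheme): each entry is the
--     # previous one plus a constant in-row step s, or a row-jump at row ends;
--     # no per-element index arithmetic, both lists filled in one pass.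
--     idx, rot_idx = [], []
--     cur, col = 0, 0
--     row_jump = s * m - (n - 1) * s
--     for k in range(n * n):
--         idx.append(cur)
--         if k:
--             rot_idx.append(cur - k)
--         if col == n - 1:
--             col = 0
--             cur += row_jump
--         else:
--             col += 1
--             cur += s
--     return idx, rot_idx
-- ===== Notes on version B (the rewrite author's own statement) =====
-- stated objective: alternative
-- what changed: Replaces A's nested loops computing i*s*m+j*s per element plus a second re-scanning pass over idx with a single incremental-stepping pass: each entry is obtained from the previous one by adding a constant in-row step s or a precomputed row-jump at row boundaries, filling both lists as it goes.
-- outside the precondition, e.g. on start_index(2, -1, 3): A returns ([], []), B returns ([0], [])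
import Mathlib
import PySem

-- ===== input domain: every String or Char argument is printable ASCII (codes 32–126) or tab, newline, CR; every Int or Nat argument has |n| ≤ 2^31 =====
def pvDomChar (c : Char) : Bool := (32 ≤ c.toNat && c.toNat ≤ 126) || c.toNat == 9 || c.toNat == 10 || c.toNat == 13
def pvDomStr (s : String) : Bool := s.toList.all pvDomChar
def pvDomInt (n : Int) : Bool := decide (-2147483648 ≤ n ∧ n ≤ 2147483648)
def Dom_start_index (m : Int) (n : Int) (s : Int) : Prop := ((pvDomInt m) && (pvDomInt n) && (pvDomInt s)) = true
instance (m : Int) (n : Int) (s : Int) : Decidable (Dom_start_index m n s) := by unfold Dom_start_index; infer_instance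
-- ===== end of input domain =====

-- B replaces A's nested per-element formula loops plus a second re-scanning pass with one
-- incremental-stepping pass (constant step s in a row, a precomputed row-jump at row ends);
-- objective: alternative (same cost, different algorithm).


-- ===== PORT A =====
-- idx[j] is ported as pyGetD (exact under Pre_, which keeps j in range: 0 ≤ n).
def start_index (m : Int) (n : Int) (s : Int) : List Int × List Int :=
  let idx : List Int := (PySem.List.pyRange 0 n 1).foldl (fun acc i =>
    (PySem.List.pyRange 0 n 1).foldl (fun acc2 j => acc2 ++ [i * s * m + j * s]) acc) []
  let rot_idx : List Int := (PySem.List.pyRange 1 (n * n) 1).foldl (fun acc j =>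
    acc ++ [PySem.List.pyGetD idx j 0 - j]) []
  (idx, rot_idx)

-- ===== PORT B =====
-- state: (idx, rot_idx, cur, col); `if k:` is `k ≠ 0` (k is an int).
def start_index_alt (m : Int) (n : Int) (s : Int) : List Int × List Int :=
  let row_jump := s * m - (n - 1) * s
  let st := (PySem.List.pyRange 0 (n * n) 1).foldl (fun st k =>
    let idx' := st.1 ++ [st.2.2.1]
    let rot' := if k ≠ 0 then st.2.1 ++ [st.2.2.1 - k] else st.2.1
    if st.2.2.2 == n - 1 then (idx', rot', st.2.2.1 + row_jump, (0 : Int))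
    else (idx', rot', st.2.2.1 + s, st.2.2.2 + 1))
    (([] : List Int), ([] : List Int), (0 : Int), (0 : Int))
  (st.1, st.2.1)

-- ===== PRECONDITION & SPEC =====
-- Pre_ restricts to the natural grid domain 0 ≤ n: for n ≤ -2 A raises IndexError in its
-- second loop, and for n = -1 A's empty result is an accident of range() that B's flat
-- loop over range(n*n) does not reproduce.
def Pre_start_index (m : Int) (n : Int) (s : Int) : Prop := 0 ≤ n
instance (m : Int) (n : Int) (s : Int) : Decidable (Pre_start_index m n s) := by unfold Pre_start_index; infer_instance
def pvWitness_start_index : Int × Int × Int := (2, 3, 5)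

def Spec_start_index (m : Int) (n : Int) (s : Int) (out : List Int × List Int) : Prop := out = start_index_alt m n s
instance (m : Int) (n : Int) (s : Int) (out : List Int × List Int) : Decidable (Spec_start_index m n s out) := by unfold Spec_start_index; infer_instance

-- ===== CLAIM (what is proved, stated in full; the proofs are below) =====
def Claim_equal_start_index : Prop := ∀ (m : Int) (n : Int) (s : Int), Dom_start_index m n s → Pre_start_index m n s → Spec_start_index m n s (start_index m n s)

-- ===== LEMMAS AND PROOFS =====

-- the closed-form value that both programs place at flat position k of the n×n grid
def pvF (t : Nat) (m s : Int) (k : Nat) : Int :=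
  ((k / t : Nat) : Int) * s * m + ((k % t : Nat) : Int) * s

-- row-major flattening of a square grid equals a flat scan driven by divmod (Nat form)
theorem flatMap_range_eq_map_range_divmod {α : Type} (t : Nat) (g : Nat → Nat → α) :
    ∀ a : Nat, (List.range a).flatMap (fun i => (List.range t).map (fun j => g i j))
      = (List.range (a * t)).map (fun k => g (k / t) (k % t)) := by
  intro a
  induction a with
  | zero => simp
  | succ a ih =>
      have hpt : ∀ j ∈ List.range t,
          g ((a * t + j) / t) ((a * t + j) % t) = g a j := by
        intro j hj
        simp only [List.mem_range] at hj
        have h1 : (a * t + j) / t = a := by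
          rw [Nat.mul_comm, Nat.mul_add_div (by omega), Nat.div_eq_of_lt hj]
          omega
        have h2 : (a * t + j) % t = j := by
          rw [Nat.mul_comm, Nat.mul_add_mod, Nat.mod_eq_of_lt hj]
        rw [h1, h2]
      rw [List.range_succ, List.flatMap_append, ih, Nat.succ_mul, List.range_add,
        List.map_append, List.map_map, List.flatMap_singleton]
      congr 1
      exact (List.map_congr_left hpt).symm

-- invariant of B's single stepping pass: after a iterations the lists hold the closed-form
-- values of positions < a, cur is the value of position a, and col is a % n
theorem alt_fold_inv (m s : Int) (t : Nat) (ht : 1 ≤ t) (a : Nat) :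
    ((List.range a).map (fun k : Nat => (k : Int))).foldl
      (fun st (k : Int) =>
        let idx' := st.1 ++ [st.2.2.1]
        let rot' := if k ≠ 0 then st.2.1 ++ [st.2.2.1 - k] else st.2.1
        if st.2.2.2 == (t : Int) - 1 then
          (idx', rot', st.2.2.1 + (s * m - ((t : Int) - 1) * s), (0 : Int))
        else (idx', rot', st.2.2.1 + s, st.2.2.2 + 1))
      (([] : List Int), ([] : List Int), (0 : Int), (0 : Int))
    = ((List.range a).map (pvF t m s),
       ((List.range a).drop 1).map (fun k => pvF t m s k - (k : Int)),
       pvF t m s a, ((a % t : Nat) : Int)) := by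
  induction a with
  | zero => simp [pvF, Nat.zero_mod]
  | succ a ih =>
      rw [List.range_succ, List.map_append, List.foldl_append, ih]
      simp only [List.map_cons, List.map_nil, List.foldl_cons, List.foldl_nil]
      have hdm := Nat.div_add_mod' a t   -- a / t * t + a % t = a
      have hlt : a % t < t := Nat.mod_lt _ (by omega)
      -- the rot' component after the step
      have hrot : (if (a : Int) ≠ 0 then
            ((List.range a).drop 1).map (fun k => pvF t m s k - (k : Int))
              ++ [pvF t m s a - (a : Int)]
          else ((List.range a).drop 1).map (fun k => pvF t m s k - (k : Int)))
          = ((List.range a ++ [a]).drop 1).map (fun k => pvF t m s k - (k : Int)) := by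
        cases a with
        | zero => simp
        | succ b =>
            have hdd : List.drop 1 (List.range (b + 1) ++ [b + 1])
                = List.drop 1 (List.range (b + 1)) ++ [b + 1] :=
              List.drop_append_of_le_length (by simp)
            rw [if_pos (by exact_mod_cast Nat.succ_ne_zero b), hdd, List.map_append]
            rfl
      by_cases hcol : a % t = t - 1
      · rw [if_pos (by simp only [beq_iff_eq]; omega)]
        have h1 : a + 1 = (a / t + 1) * t := by rw [Nat.add_mul, one_mul]; omega
        have hd : (a + 1) / t = a / t + 1 := by rw [h1, Nat.mul_div_cancel _ (by omega)]
        have hm : (a + 1) % t = 0 := by rw [h1, Nat.mul_mod_left]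
        simp only [Prod.mk.injEq]
        refine ⟨?_, hrot, ?_, ?_⟩
        · rw [List.map_append, List.map_cons, List.map_nil]
        · simp only [pvF, hd, hm, hcol]
          have htc : ((t - 1 : Nat) : Int) = (t : Int) - 1 := by omega
          push_cast [htc]
          ring
        · rw [hm]
          simp
      · rw [if_neg (by simp only [beq_iff_eq]; omega)]
        have hne : a % t + 1 < t := by omega
        have hrep : a + 1 = (a % t + 1) + a / t * t := by omega
        have hm : (a + 1) % t = a % t + 1 := by
          rw [hrep, Nat.add_mul_mod_self_right _ _ _, Nat.mod_eq_of_lt hne]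
        have hd : (a + 1) / t = a / t := by
          rw [hrep, Nat.add_mul_div_right _ _ (by omega), Nat.div_eq_of_lt hne,
            Nat.zero_add]
        simp only [Prod.mk.injEq]
        refine ⟨?_, hrot, ?_, ?_⟩
        · rw [List.map_append, List.map_cons, List.map_nil]
        · simp only [pvF, hd, hm]
          push_cast
          ring
        · rw [hm]
          push_cast
          ring

theorem start_index_eq (m n s : Int) (hn : 0 ≤ n) :
    start_index m n s = start_index_alt m n s := by
  obtain ⟨t, rfl⟩ : ∃ t : Nat, n = (t : Int) := ⟨n.toNat, (Int.toNat_of_nonneg hn).symm⟩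
  rcases Nat.eq_zero_or_pos t with rfl | ht
  · -- n = 0: both loops are empty
    simp [start_index, start_index_alt, PySem.List.pyRange_one_eq_nil (by omega : (0:Int) ≤ 0)]
  -- the common value at flat index k (Int form)
  set f : Int → Int := fun k =>
    PySem.Int.floordiv k t * s * m + PySem.Int.mod k t * s with hf
  have hNN : ((t : Int) * t) = ((t * t : Nat) : Int) := by push_cast; ring
  have hrange : PySem.List.pyRange 0 ((t : Int) * t) 1
      = (List.range (t * t)).map (fun k : Nat => (k : Int)) := by
    rw [hNN]; exact PySem.List.pyRange_zero_natCast (t * t)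
  -- A's idx equals the flat map over range(n*n)
  have hidx : (PySem.List.pyRange 0 (t : Int) 1).foldl (fun acc i =>
      (PySem.List.pyRange 0 (t : Int) 1).foldl (fun acc2 j => acc2 ++ [i * s * m + j * s]) acc) []
      = (PySem.List.pyRange 0 ((t : Int) * t) 1).map f := by
    rw [PySem.List.foldl_congr_mem _ _
        (fun acc i => acc ++ (PySem.List.pyRange 0 (t : Int) 1).map (fun j => i * s * m + j * s)) _
        (fun acc i _ => PySem.List.foldl_append_singleton_eq_map _ _ _),
      PySem.List.foldl_append_eq_flatMap, List.nil_append, hrange]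
    simp only [PySem.List.pyRange_zero_natCast, List.map_map]
    rw [List.flatMap_map]
    simp only [Function.comp_def]
    calc (List.range t).flatMap
          (fun i : Nat => (List.range t).map (fun j : Nat => (i : Int) * s * m + (j : Int) * s))
        = (List.range (t * t)).map
            (fun k => ((k / t : Nat) : Int) * s * m + ((k % t : Nat) : Int) * s) :=
          flatMap_range_eq_map_range_divmod t (fun i j => (i : Int) * s * m + (j : Int) * s) t
      _ = (List.range (t * t)).map (fun k : Nat => f (k : Int)) := by
          refine List.map_congr_left ?_
          intro k _
          simp [hf, PySem.Int.floordiv_natCast, PySem.Int.mod_natCast]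
  -- f at a cast index is pvF
  have hfF : ∀ k : Nat, f (k : Int) = pvF t m s k := by
    intro k
    simp [hf, pvF, PySem.Int.floordiv_natCast, PySem.Int.mod_natCast]
  -- A's second pass is a map over range(1, n*n)
  have hsec : (PySem.List.pyRange 1 ((t : Int) * t) 1).foldl
        (fun acc j => acc ++ [PySem.List.pyGetD ((PySem.List.pyRange 0 ((t : Int) * t) 1).map f) j 0 - j]) []
      = (PySem.List.pyRange 1 ((t : Int) * t) 1).map (fun j => f j - j) := by
    rw [PySem.List.foldl_append_singleton_eq_map, List.nil_append]
    refine List.map_congr_left ?_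
    intro j hj
    have hjb := PySem.List.mem_pyRange_one.mp hj
    rw [PySem.List.pyGetD_map_pyRange_of_nonneg f ((t : Int) * t) j 0 (by omega) hjb.2]
  -- range(1, n*n) is range(0, n*n) without its head
  have hdrop : PySem.List.pyRange 1 ((t : Int) * t) 1
      = ((List.range (t * t)).drop 1).map (fun k : Nat => (k : Int)) := by
    have h1 : (1 : Int) ≤ (t : Int) * t := by
      have : (1 : Int) * 1 ≤ (t : Int) * t := by
        apply mul_le_mul <;> omega
      omega
    have happ := PySem.List.pyRange_one_append 0 1 ((t : Int) * t) (by omega) h1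
    have h01 : PySem.List.pyRange 0 1 1 = [(0 : Int)] := by decide
    rw [h01, hrange] at happ
    calc PySem.List.pyRange 1 ((t : Int) * t) 1
        = ([(0 : Int)] ++ PySem.List.pyRange 1 ((t : Int) * t) 1).drop 1 := by simp
      _ = ((List.range (t * t)).map (fun k : Nat => (k : Int))).drop 1 := by rw [happ]
      _ = ((List.range (t * t)).drop 1).map (fun k : Nat => (k : Int)) := by rw [List.map_drop]
  -- B's fold in closed form
  have hB : start_index_alt m (t : Int) s
      = ((List.range (t * t)).map (pvF t m s),
         ((List.range (t * t)).drop 1).map (fun k => pvF t m s k - (k : Int))) := by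
    simp only [start_index_alt]
    rw [hrange, alt_fold_inv m s t ht (t * t)]
  -- assemble
  simp only [start_index]
  rw [hidx, hsec, hB, hdrop, hrange, List.map_map, List.map_map]
  refine Prod.ext ?_ ?_
  · exact List.map_congr_left (fun k _ => hfF k)
  · refine List.map_congr_left ?_
    intro k _
    simp [Function.comp, hfF k]

-- ===== VERDICT (by name: the statement is the Claim_ definition above) =====
theorem start_index_spec : Claim_equal_start_index := by
  intro m n s _ hpre
  unfold Spec_start_index
  exact start_index_eq m n s hpre
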